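-- pv_equiv track=rewrite | github.com/Brudite-Pvt-Ltd/internship2023 | PYTHON/Extra/test.py | get_char_count
-- ===== SOURCE A (Python) =====
-- def get_char_count(string):
--     char_count = {}
--     for char in string:
--         if char.isalpha() or char.isdigit():  # Include alphabetic and numeric characters
--             char = char.lower()  #lowercase
--             char_count[char] = char_count.get(char, 0) + 1
--
--     result = {}
--     for key, value in char_count.items():
--         if value in result:
--             result[value].append(key)
--         else:
--             result[value] = [key]
--
--     sorted_result = dict(sorted(result.items(), key=lambda x: x[0], reverse=True))
--     for key in sorted_result:
--         sorted_result[key].sort()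
--     return sorted_result
-- ===== SOURCE B (Python) =====
-- def get_char_count(string):
--     char_count = {}
--     for char in string:
--         if char.isalpha() or char.isdigit():
--             char = char.lower()
--             char_count[char] = char_count.get(char, 0) + 1
--     return {v: sorted(k for k, u in char_count.items() if u == v)
--             for v in sorted(set(char_count.values()), reverse=True)}
-- ===== Notes on version B (the rewrite author's own statement) =====
-- stated objective: simpler
-- what changed: A's second phase (build a count->chars dict by appending, sort its items by count descending, then sort each bucket in place) is replaced by a single comprehension: for each distinct count, taken in descending order, collect the sorted chars having that count.
import Mathlib
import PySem

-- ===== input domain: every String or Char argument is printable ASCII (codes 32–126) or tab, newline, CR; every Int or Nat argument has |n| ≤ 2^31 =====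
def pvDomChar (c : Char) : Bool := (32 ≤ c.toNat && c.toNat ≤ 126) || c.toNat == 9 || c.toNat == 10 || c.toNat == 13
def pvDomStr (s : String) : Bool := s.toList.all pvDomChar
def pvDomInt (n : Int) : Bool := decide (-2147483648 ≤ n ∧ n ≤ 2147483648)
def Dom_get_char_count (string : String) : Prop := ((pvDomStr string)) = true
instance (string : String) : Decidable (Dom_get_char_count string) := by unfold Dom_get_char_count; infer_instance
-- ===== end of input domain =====

-- B keeps A's counting loop but replaces A's group-into-a-dict-then-sort-twice phase by a single
-- comprehension over the distinct counts sorted descending (objective: simpler; same asymptotic cost).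

-- ===== PORT A =====
def get_char_count (string : String) : List (Int × List String) :=
  let char_count : PySem.Dict String Int :=
    string.toList.foldl (fun d char =>
      if PySem.Chars.isalpha char || PySem.Chars.isdigit char then
        let c := String.ofList [PySem.Chars.lowerChar char]
        d.insert c (d.getD c 0 + 1)
      else d) PySem.Dict.empty
  let result : PySem.Dict Int (List String) :=
    char_count.items.foldl (fun r kv =>
      if r.contains kv.2 then r.insert kv.2 (r.getD kv.2 [] ++ [kv.1])
      else r.insert kv.2 [kv.1]) PySem.Dict.empty
  let sorted_result := PySem.List.sorted result.items (fun p => p.1) true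
  sorted_result.map (fun p => (p.1, PySem.List.sorted p.2 (fun s => s) false))

-- ===== PORT B =====
def get_char_count_alt (string : String) : List (Int × List String) :=
  let char_count : PySem.Dict String Int :=
    string.toList.foldl (fun d char =>
      if PySem.Chars.isalpha char || PySem.Chars.isdigit char then
        let c := String.ofList [PySem.Chars.lowerChar char]
        d.insert c (d.getD c 0 + 1)
      else d) PySem.Dict.empty
  (PySem.List.sorted (PySem.Set.ofList char_count.values) (fun v => v) true).map
    (fun v => (v, PySem.List.sorted ((char_count.items.filter (fun kv => kv.2 == v)).map (fun kv => kv.1)) (fun s => s) false))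

-- ===== PRECONDITION & SPEC =====
def Spec_get_char_count (string : String) (out : List (Int × List String)) : Prop := out = get_char_count_alt string
instance (string : String) (out : List (Int × List String)) : Decidable (Spec_get_char_count string out) := by unfold Spec_get_char_count; infer_instance

-- ===== CLAIM (what is proved, stated in full; the proofs are below) =====
def Claim_equal_get_char_count : Prop := ∀ (string : String), Dom_get_char_count string → Spec_get_char_count string (get_char_count string)

-- ===== LEMMAS AND PROOFS =====

-- ordered dedup of a list with one element appended
theorem pv_dedup_append_singleton {α : Type} [BEq α] [LawfulBEq α] (xs : List α) (v : α) :
    PySem.List.dedup (xs ++ [v]) =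
      if v ∈ xs then PySem.List.dedup xs else PySem.List.dedup xs ++ [v] := by
  rw [PySem.List.dedup_eq_ofList, PySem.List.dedup_eq_ofList,
      PySem.Set.ofList_eq_foldl, PySem.Set.ofList_eq_foldl, List.foldl_append,
      List.foldl_cons, List.foldl_nil, ← PySem.Set.ofList_eq_foldl]
  by_cases h : v ∈ xs
  · simp [PySem.Set.add, PySem.Set.contains, PySem.Set.mem_ofList, h]
  · simp [PySem.Set.add, PySem.Set.contains, PySem.Set.mem_ofList, h]

-- A's grouping loop, characterised: items of the built dict, for any association list
theorem pv_group_items (l : List (String × Int)) :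
    (l.foldl (fun r kv =>
        if r.contains kv.2 then r.insert kv.2 (r.getD kv.2 [] ++ [kv.1])
        else r.insert kv.2 [kv.1]) PySem.Dict.empty).items
    = (PySem.List.dedup (l.map Prod.snd)).map
        (fun v => (v, (l.filter (fun kv => kv.2 == v)).map Prod.fst)) := by
  induction l using List.reverseRecOn with
  | nil => rfl
  | append_singleton l kv ih =>
    obtain ⟨k, v⟩ := kv
    rw [List.foldl_append, List.foldl_cons, List.foldl_nil]
    have hkeys : (l.foldl (fun r kv =>
        if r.contains kv.2 then r.insert kv.2 (r.getD kv.2 [] ++ [kv.1])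
        else r.insert kv.2 [kv.1]) PySem.Dict.empty).keys = PySem.List.dedup (l.map Prod.snd) := by
      show ((l.foldl _ PySem.Dict.empty).items.map Prod.fst) = _
      rw [ih, List.map_map]
      simp [Function.comp_def]
    have hnd : (l.foldl (fun r kv =>
        if r.contains kv.2 then r.insert kv.2 (r.getD kv.2 [] ++ [kv.1])
        else r.insert kv.2 [kv.1]) PySem.Dict.empty).keys.Nodup := by
      rw [hkeys]; exact PySem.List.nodup_dedup _
    by_cases hv : v ∈ l.map Prod.snd
    · have hcont : (l.foldl (fun r kv =>
          if r.contains kv.2 then r.insert kv.2 (r.getD kv.2 [] ++ [kv.1])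
          else r.insert kv.2 [kv.1]) PySem.Dict.empty).contains v = true := by
        rw [PySem.Dict.contains_eq_decide_mem_keys, hkeys]
        simp [hv]
      have hmem : (v, (l.filter (fun kv => kv.2 == v)).map Prod.fst) ∈ (l.foldl (fun r kv =>
          if r.contains kv.2 then r.insert kv.2 (r.getD kv.2 [] ++ [kv.1])
          else r.insert kv.2 [kv.1]) PySem.Dict.empty).items := by
        rw [ih]
        exact List.mem_map_of_mem ((PySem.List.mem_dedup _ _).mpr hv)
      have hget := PySem.Dict.getD_of_mem_items _ hmem hnd []
      simp only [hcont, if_true]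
      rw [PySem.Dict.items_insert_of_contains _ _ hcont, ih, hget,
          List.map_append, List.map_cons, List.map_nil,
          pv_dedup_append_singleton, if_pos hv, List.map_map]
      apply List.map_congr_left
      intro v' hv'
      by_cases h : v' = v
      · subst h
        simp [List.filter_append]
      · simp [List.filter_append, h, Ne.symm h]
    · have hcont : (l.foldl (fun r kv =>
          if r.contains kv.2 then r.insert kv.2 (r.getD kv.2 [] ++ [kv.1])
          else r.insert kv.2 [kv.1]) PySem.Dict.empty).contains v = false := by
        rw [PySem.Dict.contains_eq_decide_mem_keys, hkeys]
        simp [hv]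
      simp only [hcont, if_false, Bool.false_eq_true]
      rw [PySem.Dict.items_insert_of_not_contains _ _ hcont, ih,
          List.map_append, List.map_cons, List.map_nil,
          pv_dedup_append_singleton, if_neg hv, List.map_append]
      congr 1
      · apply List.map_congr_left
        intro v' hv'
        have hne : v ≠ v' := by
          intro hh; subst hh
          exact hv ((PySem.List.mem_dedup _ _).mp hv')
        simp [List.filter_append, hne]
      · have hfil : l.filter (fun kv => kv.2 == v) = [] := by
          rw [List.filter_eq_nil_iff]
          intro kv hkv
          simp only [beq_iff_eq]
          intro hh
          exact hv (hh ▸ List.mem_map_of_mem hkv)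
        simp [List.filter_append, hfil]

-- the common core: A's phase 2 equals B's phase 2 on any items list
theorem pv_main_core (l : List (String × Int)) :
    (PySem.List.sorted ((l.foldl (fun r kv =>
        if r.contains kv.2 then r.insert kv.2 (r.getD kv.2 [] ++ [kv.1])
        else r.insert kv.2 [kv.1]) PySem.Dict.empty).items) (fun p => p.1) true).map
      (fun p => (p.1, PySem.List.sorted p.2 (fun s => s) false))
    = (PySem.List.sorted (PySem.Set.ofList (l.map Prod.snd)) (fun v => v) true).map
        (fun v => (v, PySem.List.sorted ((l.filter (fun kv => kv.2 == v)).map (fun kv => kv.1)) (fun s => s) false)) := by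
  rw [pv_group_items, PySem.List.dedup_eq_ofList]
  have hsorted : PySem.List.sorted ((PySem.Set.ofList (l.map Prod.snd)).map
        (fun v => (v, (l.filter (fun kv => kv.2 == v)).map Prod.fst))) (fun p => p.1) true
      = (PySem.List.sorted (PySem.Set.ofList (l.map Prod.snd)) (fun v => v) true).map
        (fun v => (v, (l.filter (fun kv => kv.2 == v)).map Prod.fst)) := by
    apply PySem.List.sorted_rev_eq_of_perm_of_pairwise_gt
    · exact (PySem.List.sorted_perm (PySem.Set.ofList (l.map Prod.snd)) (fun v => v) true).map _
    · rw [List.pairwise_map]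
      have h1 := PySem.List.sorted_pairwise_rev (PySem.Set.ofList (l.map Prod.snd)) (fun v => v)
      have hnd : (PySem.List.sorted (PySem.Set.ofList (l.map Prod.snd)) (fun v => v) true).Nodup := by
        refine (PySem.List.sorted_perm _ _ true).nodup_iff.mpr ?_
        rw [← PySem.List.dedup_eq_ofList]
        exact PySem.List.nodup_dedup _
      exact (h1.and hnd).imp (fun h => lt_of_le_of_ne h.1 (fun hh => h.2 hh.symm))
  rw [hsorted, List.map_map]
  rfl

-- ===== VERDICT (by name: the statement is the Claim_ definition above) =====
theorem get_char_count_spec : Claim_equal_get_char_count := by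
  intro s _
  unfold Spec_get_char_count get_char_count get_char_count_alt
  exact pv_main_core _
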